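-- pv_equiv track=rewrite | github.com/Gavin0099/ai-governance-framework | governance_tools/architecture_impact_estimator.py | _required_evidence
-- ===== SOURCE A (Python) =====
-- def _required_evidence(active_rules: list[str], drift_result: dict, api_result: dict | None) -> list[str]:
--     evidence = ["architecture-review"]
--
--     if "refactor" in active_rules:
--         evidence.extend(
--             [
--                 "regression-evidence",
--                 "interface-stability-evidence",
--                 "cleanup-or-rollback-evidence",
--                 "error-path-inventory",
--                 "error-behavior-diff",
--             ]
--         )
--
--     if api_result and (api_result.get("removed") or api_result.get("added")):
--         evidence.append("public-api-review")
--
--     if "kernel-driver" in active_rules: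
--         evidence.extend(
--             [
--                 "driver-static-analysis",
--                 "irql-verification",
--                 "ioctl-boundary-verification",
--             ]
--         )
--
--     if drift_result.get("errors") or drift_result.get("warnings"):
--         evidence.append("architecture-drift-review")
--
--     deduped = []
--     for item in evidence:
--         if item not in deduped:
--             deduped.append(item)
--     return deduped
-- ===== SOURCE B (Python) =====
-- def _required_evidence(active_rules: list[str], drift_result: dict, api_result: dict | None) -> list[str]:
--     spec = [
--         (True, ["architecture-review"]),
--         ("refactor" in active_rules, [
--             "regression-evidence",
--             "interface-stability-evidence",
--             "cleanup-or-rollback-evidence",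
--             "error-path-inventory",
--             "error-behavior-diff",
--         ]),
--         (bool(api_result and (api_result.get("removed") or api_result.get("added"))),
--          ["public-api-review"]),
--         ("kernel-driver" in active_rules, [
--             "driver-static-analysis",
--             "irql-verification",
--             "ioctl-boundary-verification",
--         ]),
--         (bool(drift_result.get("errors") or drift_result.get("warnings")),
--          ["architecture-drift-review"]),
--     ]
--     result = []
--     for cond, items in spec:
--         if cond:
--             result.extend(items)
--     return result
-- ===== Notes on version B (the rewrite author's own statement) =====
-- stated objective: simpler
-- what changed: Replaced the sequence of conditional extend/append statements plus an O(n^2) order-preserving dedup pass with a single (condition, items) specification table folded into the result; because the ten evidence strings are pairwise distinct the dedup pass is a provable no-op and is dropped.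
import Mathlib
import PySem

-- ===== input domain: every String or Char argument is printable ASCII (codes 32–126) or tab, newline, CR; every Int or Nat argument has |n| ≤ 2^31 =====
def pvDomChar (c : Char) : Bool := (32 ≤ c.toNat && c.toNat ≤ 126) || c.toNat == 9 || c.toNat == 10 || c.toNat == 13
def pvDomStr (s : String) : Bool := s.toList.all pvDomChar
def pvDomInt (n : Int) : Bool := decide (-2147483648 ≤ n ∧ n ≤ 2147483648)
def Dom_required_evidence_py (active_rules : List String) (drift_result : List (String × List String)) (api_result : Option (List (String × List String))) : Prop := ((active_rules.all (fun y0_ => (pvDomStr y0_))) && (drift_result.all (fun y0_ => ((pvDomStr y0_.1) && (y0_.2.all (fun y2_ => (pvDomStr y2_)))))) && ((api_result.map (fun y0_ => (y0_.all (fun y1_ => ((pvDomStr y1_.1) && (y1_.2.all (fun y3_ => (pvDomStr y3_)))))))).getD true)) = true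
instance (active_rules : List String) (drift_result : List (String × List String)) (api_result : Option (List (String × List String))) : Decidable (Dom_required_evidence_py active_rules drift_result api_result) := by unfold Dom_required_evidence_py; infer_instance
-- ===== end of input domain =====

-- B replaces A's conditional extend/append statements + O(n^2) dedup pass with a single
-- (condition, items) table folded once; the evidence strings are pairwise distinct, so the
-- dedup is a provable no-op and B drops it (objective: simpler).

-- shared transliteration of Python's `d.get(k)`-is-truthy on an association list
-- (first match; a missing key or an empty value list is falsy) — exact for dict.get
def pvTruthyGet (d : List (String × List String)) (k : String) : Bool :=
  match d.find? (fun p => p.1 == k) with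
  | some p => !p.2.isEmpty
  | none => false

-- ===== PORT A =====
def required_evidence_py (active_rules : List String) (drift_result : List (String × List String)) (api_result : Option (List (String × List String))) : List String :=
  let evidence := ["architecture-review"]
  let evidence := if "refactor" ∈ active_rules then
      evidence ++ ["regression-evidence", "interface-stability-evidence",
        "cleanup-or-rollback-evidence", "error-path-inventory", "error-behavior-diff"]
    else evidence
  let evidence := match api_result with
    | some d =>
        if !d.isEmpty && (pvTruthyGet d "removed" || pvTruthyGet d "added") then
          evidence ++ ["public-api-review"]
        else evidence
    | none => evidence
  let evidence := if "kernel-driver" ∈ active_rules then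
      evidence ++ ["driver-static-analysis", "irql-verification", "ioctl-boundary-verification"]
    else evidence
  let evidence := if pvTruthyGet drift_result "errors" || pvTruthyGet drift_result "warnings" then
      evidence ++ ["architecture-drift-review"]
    else evidence
  evidence.foldl (fun deduped item => if item ∈ deduped then deduped else deduped ++ [item]) []

-- ===== PORT B =====
def required_evidence_py_alt (active_rules : List String) (drift_result : List (String × List String)) (api_result : Option (List (String × List String))) : List String :=
  let spec : List (Bool × List String) :=
    [ (true, ["architecture-review"]),
      (decide ("refactor" ∈ active_rules),
        ["regression-evidence", "interface-stability-evidence",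
         "cleanup-or-rollback-evidence", "error-path-inventory", "error-behavior-diff"]),
      ((match api_result with
        | some d => !d.isEmpty && (pvTruthyGet d "removed" || pvTruthyGet d "added")
        | none => false), ["public-api-review"]),
      (decide ("kernel-driver" ∈ active_rules),
        ["driver-static-analysis", "irql-verification", "ioctl-boundary-verification"]),
      (pvTruthyGet drift_result "errors" || pvTruthyGet drift_result "warnings",
        ["architecture-drift-review"]) ]
  spec.foldl (fun result p => if p.1 then result ++ p.2 else result) []

-- ===== PRECONDITION & SPEC =====
def Spec_required_evidence_py (active_rules : List String) (drift_result : List (String × List String)) (api_result : Option (List (String × List String))) (out : List String) : Prop := out = required_evidence_py_alt active_rules drift_result api_result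
instance (active_rules : List String) (drift_result : List (String × List String)) (api_result : Option (List (String × List String))) (out : List String) : Decidable (Spec_required_evidence_py active_rules drift_result api_result out) := by unfold Spec_required_evidence_py; infer_instance

-- ===== CLAIM (what is proved, stated in full; the proofs are below) =====
def Claim_equal_required_evidence_py : Prop := ∀ (active_rules : List String) (drift_result : List (String × List String)) (api_result : Option (List (String × List String))), Dom_required_evidence_py active_rules drift_result api_result → Spec_required_evidence_py active_rules drift_result api_result (required_evidence_py active_rules drift_result api_result)

-- ===== LEMMAS AND PROOFS =====

-- ===== VERDICT (by name: the statement is the Claim_ definition above) =====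
theorem required_evidence_py_spec : Claim_equal_required_evidence_py := by
  intro active_rules drift_result api_result _
  unfold Spec_required_evidence_py required_evidence_py required_evidence_py_alt
  cases api_result with
  | none =>
    by_cases h1 : "refactor" ∈ active_rules <;>
    by_cases h2 : "kernel-driver" ∈ active_rules <;>
    by_cases h3 : (pvTruthyGet drift_result "errors" || pvTruthyGet drift_result "warnings") = true <;>
    simp [h1, h2, h3, List.foldl]
  | some d =>
    by_cases h1 : "refactor" ∈ active_rules <;>
    by_cases h2 : "kernel-driver" ∈ active_rules <;>
    by_cases h3 : (pvTruthyGet drift_result "errors" || pvTruthyGet drift_result "warnings") = true <;>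
    by_cases h4 : (!d.isEmpty && (pvTruthyGet d "removed" || pvTruthyGet d "added")) = true <;>
    simp [h1, h2, h3, h4, List.foldl]
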